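-- pv_equiv track=rewrite | github.com/gpadillan/diplomas | pages/academica/academica_main.py | deduplicate_headers
-- ===== SOURCE A (Python) =====
-- def deduplicate_headers(headers):
--     seen = {}
--     result = []
--     for h in headers:
--         key = h if h else "Unnamed"
--         count = seen.get(key, 0)
--         new_key = key if count == 0 else f"{key}.{count}"
--         result.append(new_key)
--         seen[key] = count + 1
--     return result
-- ===== SOURCE B (Python) =====
-- def deduplicate_headers(headers):
--     groups = {}
--     for idx, h in enumerate(headers):
--         groups.setdefault(h if h else "Unnamed", []).append(idx)
--     result = [None] * len(headers)
--     for key, positions in groups.items():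
--         for i, idx in enumerate(positions):
--             result[idx] = key if i == 0 else f"{key}.{i}"
--     return result
-- ===== Notes on version B (the rewrite author's own statement) =====
-- stated objective: alternative
-- what changed: Replaces the flat single pass with a running per-key counter dict by a two-phase group-then-assign scheme: one pass builds a map from each normalized key to the list of its original positions, then a preallocated result is filled group by group, the enumeration rank within the group giving the suffix.
import Mathlib
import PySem

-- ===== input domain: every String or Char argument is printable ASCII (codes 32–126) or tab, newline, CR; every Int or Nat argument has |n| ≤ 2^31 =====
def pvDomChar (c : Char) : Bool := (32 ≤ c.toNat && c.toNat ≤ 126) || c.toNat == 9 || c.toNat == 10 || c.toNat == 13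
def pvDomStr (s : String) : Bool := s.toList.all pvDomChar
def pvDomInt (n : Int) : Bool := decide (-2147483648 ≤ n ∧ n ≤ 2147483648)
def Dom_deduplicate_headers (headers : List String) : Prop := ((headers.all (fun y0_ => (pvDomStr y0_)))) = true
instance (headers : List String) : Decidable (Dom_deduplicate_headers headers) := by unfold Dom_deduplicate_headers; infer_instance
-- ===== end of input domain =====

-- B replaces A's flat single pass with a running per-key counter dict by a two-phase
-- group-then-assign scheme: first group original positions by normalized key, then fill
-- a preallocated result per group, the rank inside the group giving the suffix
-- (objective: alternative — same O(n) cost, different decomposition).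

-- `h if h else "Unnamed"` (string truthiness = nonempty), shared by both sources verbatim
def pvNorm (h : String) : String := if h ≠ "" then h else "Unnamed"

-- ===== PORT A =====
def pvStepA (st : PySem.Dict String Int × List String) (h : String) :
    PySem.Dict String Int × List String :=
  let seen := st.1
  let result := st.2
  let key := pvNorm h
  let count := seen.getD key 0
  let new_key := if count = 0 then key else key ++ "." ++ PySem.Int.toStr count
  (seen.insert key (count + 1), result ++ [new_key])

def deduplicate_headers (headers : List String) : List String :=
  (headers.foldl pvStepA (PySem.Dict.empty, [])).2

-- ===== PORT B =====
-- groups.setdefault(key, []).append(idx)  ≡  groups[key] = groups.get(key, []) + [idx]  = Dict.modify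
-- result = [None] * len(headers): the placeholder (here "") is overwritten at every slot before return
def deduplicate_headers_alt (headers : List String) : List String :=
  let groups := (PySem.List.enumerate headers 0).foldl
      (fun d p => d.modify (pvNorm p.2) ([] : List Int) (fun v => v ++ [p.1])) PySem.Dict.empty
  let result0 := List.replicate headers.length ""
  groups.items.foldl
    (fun res kv =>
      (PySem.List.enumerate kv.2 0).foldl
        (fun r ip =>
          PySem.List.pySetD r ip.2
            (if ip.1 = 0 then kv.1 else kv.1 ++ "." ++ PySem.Int.toStr ip.1)) res)
    result0

-- ===== PRECONDITION & SPEC =====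
def Spec_deduplicate_headers (headers : List String) (out : List String) : Prop := out = deduplicate_headers_alt headers
instance (headers : List String) (out : List String) : Decidable (Spec_deduplicate_headers headers out) := by unfold Spec_deduplicate_headers; infer_instance

-- ===== CLAIM (what is proved, stated in full; the proofs are below) =====
def Claim_equal_deduplicate_headers : Prop := ∀ (headers : List String), Dom_deduplicate_headers headers → Spec_deduplicate_headers headers (deduplicate_headers headers)

-- ===== LEMMAS AND PROOFS =====

-- the label both programs attach: the key, or "key.c" when c prior copies were seen
def pvLabel (k : String) (c : Int) : String :=
  if c = 0 then k else k ++ "." ++ PySem.Int.toStr c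

-- the common target: position j carries the label of keys[j] with its count in keys[:j]
def pvSpecAt (keys : List String) (j : Nat) : String :=
  pvLabel (keys.getD j "") (((keys.take j).count (keys.getD j "") : Int))

def pvSpecList (keys : List String) : List String :=
  (List.range keys.length).map (pvSpecAt keys)

lemma specList_snoc (p : List String) (k : String) :
    pvSpecList (p ++ [k]) = pvSpecList p ++ [pvLabel k ((p.count k : Int))] := by
  unfold pvSpecList
  rw [List.length_append, List.length_singleton, List.range_succ, List.map_append]
  congr 1
  · apply List.map_congr_left
    intro j hj
    rw [List.mem_range] at hj
    unfold pvSpecAt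
    rw [List.getD_eq_getElem?_getD, List.getElem?_append_left hj,
      ← List.getD_eq_getElem?_getD, List.take_append_of_le_length (le_of_lt hj)]
  · have h2 : (p ++ [k]).take p.length = p := List.take_left
    simp [pvSpecAt, h2]

-- A's loop, run from any dict counting the processed prefix, computes pvSpecList
lemma A_loop (rest : List String) : ∀ (p : List String) (d : PySem.Dict String Int),
    (∀ k, d.getD k 0 = ((p.map pvNorm).count k : Int)) →
    (rest.foldl pvStepA (d, pvSpecList (p.map pvNorm))).2 = pvSpecList ((p ++ rest).map pvNorm) := by
  induction rest with
  | nil => intro p d _; simp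
  | cons h rest ih =>
    intro p d hd
    rw [List.foldl_cons]
    have hc := hd (pvNorm h)
    have hkey : pvStepA (d, pvSpecList (p.map pvNorm)) h
        = (d.insert (pvNorm h) (d.getD (pvNorm h) 0 + 1),
           pvSpecList (p.map pvNorm) ++
             [if d.getD (pvNorm h) 0 = 0 then pvNorm h
              else pvNorm h ++ "." ++ PySem.Int.toStr (d.getD (pvNorm h) 0)]) := rfl
    have hlab : (if d.getD (pvNorm h) 0 = 0 then pvNorm h
          else pvNorm h ++ "." ++ PySem.Int.toStr (d.getD (pvNorm h) 0))
        = pvLabel (pvNorm h) (((p.map pvNorm).count (pvNorm h) : Int)) := by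
      rw [hc]; rfl
    have hsnoc : pvSpecList (p.map pvNorm) ++ [pvLabel (pvNorm h) (((p.map pvNorm).count (pvNorm h) : Int))]
        = pvSpecList ((p ++ [h]).map pvNorm) := by
      rw [List.map_append, List.map_singleton, specList_snoc]
    rw [hkey, hlab, hsnoc]
    have hinv : ∀ k, (d.insert (pvNorm h) (d.getD (pvNorm h) 0 + 1)).getD k 0
        = (((p ++ [h]).map pvNorm).count k : Int) := by
      intro k
      rw [PySem.Dict.getD_insert]
      by_cases hk : k = pvNorm h
      · subst hk; rw [hc]; simp [List.count_append]
      · rw [if_neg hk, hd k]; simp [List.count_append, Ne.symm hk]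
    have := ih (p ++ [h]) _ hinv
    simpa [List.append_assoc] using this

lemma A_eq_spec (headers : List String) :
    deduplicate_headers headers = pvSpecList (headers.map pvNorm) := by
  have h0 : ∀ k, (PySem.Dict.empty : PySem.Dict String Int).getD k 0
      = ((([] : List String).map pvNorm).count k : Int) := by
    intro k; simp [PySem.Dict.getD_empty]
  have := A_loop headers [] PySem.Dict.empty h0
  simpa [deduplicate_headers, pvSpecList] using this

-- the inner assignment loop of B over one group's position list, fully characterised
lemma inner_set (k : String) (t : List String) : ∀ (m : Nat) (c : Int) (res : List String),
    m + t.length ≤ res.length → ∀ j : Nat,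
    ((PySem.List.enumerate (((PySem.List.enumerate t (m : Int)).filter
          (fun p => pvNorm p.2 == k)).map (·.1)) c).foldl
        (fun r ip => PySem.List.pySetD r ip.2 (pvLabel k ip.1)) res)[j]? =
      if m ≤ j ∧ j - m < t.length ∧ pvNorm (t.getD (j - m) "") = k then
        some (pvLabel k (c + ((t.take (j - m)).countP (fun x => pvNorm x == k) : Int)))
      else res[j]? := by
  induction t with
  | nil =>
    intro m c res _ j
    simp [PySem.List.enumerate_nil]
  | cons h t ih =>
    intro m c res hlen j
    simp only [List.length_cons] at hlen
    rw [PySem.List.enumerate_cons]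
    have hm1 : (m : Int) + 1 = ((m + 1 : Nat) : Int) := by push_cast; ring
    by_cases hh : pvNorm h = k
    · -- head belongs to the group: position m is set with label c
      rw [List.filter_cons_of_pos (by simp [hh]), List.map_cons, PySem.List.enumerate_cons,
        List.foldl_cons]
      simp only [PySem.List.pySetD_natCast]
      rw [hm1, ih (m + 1) (c + 1) (res.set m (pvLabel k c)) (by rw [List.length_set]; omega) j]
      rcases lt_trichotomy j m with hj | hj | hj
      · rw [if_neg (by omega), if_neg (by omega), List.getElem?_set_ne (by omega)]
      · subst hj
        rw [if_neg (by omega), if_pos ⟨le_refl j, by simp, by simpa using hh⟩,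
          List.getElem?_set_self (by omega)]
        simp
      · have hsub : j - m = (j - (m + 1)) + 1 := by omega
        rw [hsub]
        simp only [List.getD_cons_succ, List.take_succ_cons, List.length_cons, List.countP_cons]
        by_cases hc : j - (m + 1) < t.length ∧ pvNorm (t.getD (j - (m + 1)) "") = k
        · rw [if_pos ⟨by omega, hc.1, hc.2⟩, if_pos ⟨by omega, by omega, hc.2⟩]
          have h1 : (if (pvNorm h == k) = true then 1 else 0) = 1 := by simp [hh]
          rw [h1]
          congr 2
          push_cast
          ring
        · rw [if_neg (fun hx => hc ⟨hx.2.1, hx.2.2⟩), if_neg (fun hx => hc ⟨by omega, hx.2.2⟩),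
            List.getElem?_set_ne (by omega)]
    · -- head is outside the group
      rw [List.filter_cons_of_neg (by simp [hh]), hm1, ih (m + 1) c res (by omega) j]
      rcases lt_trichotomy j m with hj | hj | hj
      · rw [if_neg (by omega), if_neg (by omega)]
      · subst hj
        rw [if_neg (by omega), if_neg (by
          rintro ⟨-, -, hx⟩
          rw [Nat.sub_self] at hx
          exact hh (by simpa using hx))]
      · have hsub : j - m = (j - (m + 1)) + 1 := by omega
        rw [hsub]
        simp only [List.getD_cons_succ, List.take_succ_cons, List.length_cons, List.countP_cons]
        by_cases hc : j - (m + 1) < t.length ∧ pvNorm (t.getD (j - (m + 1)) "") = k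
        · rw [if_pos ⟨by omega, hc.1, hc.2⟩, if_pos ⟨by omega, by omega, hc.2⟩]
          have h0 : (if (pvNorm h == k) = true then 1 else 0) = 0 := by simp [hh]
          rw [h0]
          simp
        · rw [if_neg (fun hx => hc ⟨hx.2.1, hx.2.2⟩), if_neg (fun hx => hc ⟨by omega, hx.2.2⟩)]

lemma inner_length (k : String) (ps : List Int) (c : Int) (res : List String) :
    ((PySem.List.enumerate ps c).foldl
        (fun r ip => PySem.List.pySetD r ip.2 (pvLabel k ip.1)) res).length = res.length := by
  induction ps generalizing c res with
  | nil => simp [PySem.List.enumerate_nil]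
  | cons p ps ih =>
    rw [PySem.List.enumerate_cons, List.foldl_cons, ih]
    simp [PySem.List.length_pySetD]

-- the group list B folds over, for a key
def pvPos (headers : List String) (k : String) : List Int :=
  ((PySem.List.enumerate headers 0).filter (fun p => pvNorm p.2 == k)).map (·.1)

lemma spec_of_hit (headers : List String) (j : Nat) (hj : j < headers.length)
    (k : String) (hk : pvNorm (headers.getD j "") = k) :
    pvLabel k ((0 : Int) + (((headers.take j).countP (fun x => pvNorm x == k)) : Int))
      = pvSpecAt (headers.map pvNorm) j := by
  unfold pvSpecAt
  have hgd : (headers.map pvNorm).getD j "" = k := by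
    rw [List.getD_eq_getElem?_getD, List.getElem?_map]
    rw [List.getD_eq_getElem?_getD] at hk
    rw [List.getElem?_eq_getElem hj] at hk ⊢
    simpa using hk
  rw [hgd, ← List.map_take, List.count_eq_countP, List.countP_map]
  simp only [Function.comp_def, zero_add]

-- B's outer loop over the items of the group dict
lemma outer_fold (headers : List String) : ∀ (its : List (String × List Int)) (res : List String),
    res.length = headers.length →
    (∀ kv ∈ its, kv.2 = pvPos headers kv.1) →
    ∀ j : Nat,
    (its.foldl (fun res kv =>
        (PySem.List.enumerate kv.2 0).foldl
          (fun r ip => PySem.List.pySetD r ip.2 (pvLabel kv.1 ip.1)) res) res)[j]? =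
      if j < headers.length ∧ pvNorm (headers.getD j "") ∈ its.map Prod.fst then
        some (pvSpecAt (headers.map pvNorm) j)
      else res[j]? := by
  intro its
  induction its with
  | nil => intro res _ _ j; simp
  | cons kv its ih =>
    intro res hlen hv j
    rw [List.foldl_cons]
    have hkv := hv kv (List.mem_cons_self)
    set res1 := (PySem.List.enumerate kv.2 0).foldl
      (fun r ip => PySem.List.pySetD r ip.2 (pvLabel kv.1 ip.1)) res with hres1
    have hlen1 : res1.length = headers.length := by rw [hres1, inner_length, hlen]
    rw [ih res1 hlen1 (fun p hp => hv p (List.mem_cons_of_mem _ hp)) j]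
    have hinner : res1[j]? =
        if 0 ≤ j ∧ j - 0 < headers.length ∧ pvNorm (headers.getD (j - 0) "") = kv.1 then
          some (pvLabel kv.1 ((0 : Int) + ((headers.take (j - 0)).countP (fun x => pvNorm x == kv.1) : Int)))
        else res[j]? := by
      rw [hres1, hkv]
      have h0 : pvPos headers kv.1
          = ((PySem.List.enumerate headers ((0 : Nat) : Int)).filter
              (fun p => pvNorm p.2 == kv.1)).map (·.1) := by
        simp [pvPos]
      rw [h0]
      exact inner_set kv.1 headers 0 0 res (by omega) j
    by_cases htail : j < headers.length ∧ pvNorm (headers.getD j "") ∈ its.map Prod.fst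
    · rw [if_pos htail, if_pos ⟨htail.1, by rw [List.map_cons]; exact List.mem_cons_of_mem _ htail.2⟩]
    · rw [if_neg htail, hinner]
      simp only [Nat.sub_zero, Nat.zero_le, true_and]
      by_cases hhead : j < headers.length ∧ pvNorm (headers.getD j "") = kv.1
      · rw [if_pos hhead,
          if_pos ⟨hhead.1, by rw [List.map_cons]; exact List.mem_cons.mpr (Or.inl hhead.2)⟩,
          spec_of_hit headers j hhead.1 kv.1 hhead.2]
      · rw [if_neg hhead, if_neg (by
          intro hx
          rw [List.map_cons] at hx
          rcases List.mem_cons.mp hx.2 with h1 | h2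
          · exact hhead ⟨hx.1, h1⟩
          · exact htail ⟨hx.1, h2⟩)]

lemma B_eq_spec (headers : List String) :
    deduplicate_headers_alt headers = pvSpecList (headers.map pvNorm) := by
  unfold deduplicate_headers_alt
  set groups := (PySem.List.enumerate headers 0).foldl
      (fun d p => d.modify (pvNorm p.2) ([] : List Int) (fun v => v ++ [p.1]))
      PySem.Dict.empty with hgroups
  have hnodup : groups.keys.Nodup := by
    rw [hgroups]
    exact PySem.Dict.nodup_keys_foldl_modify_key _ (fun p : Int × String => pvNorm p.2) _
      (fun _ p => fun v => v ++ [p.1]) _ PySem.Dict.nodup_keys_empty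
  have hfold : groups = ((PySem.List.enumerate headers 0).map
        (fun p : Int × String => (pvNorm p.2, p.1))).foldl
      (fun d q => d.modify q.1 ([] : List Int) (fun v => v ++ [q.2])) PySem.Dict.empty := by
    rw [hgroups]
    exact (@List.foldl_map (Int × String) (String × Int) (PySem.Dict String (List Int))
      (fun p => (pvNorm p.2, p.1))
      (fun d q => d.modify q.1 ([] : List Int) (fun v => v ++ [q.2]))
      (PySem.List.enumerate headers 0) PySem.Dict.empty).symm
  have hgetD : ∀ k, groups.getD k [] = pvPos headers k := by
    intro k
    rw [hfold, PySem.Dict.getD_foldl_modify_append, PySem.Dict.getD_empty]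
    unfold pvPos
    rw [List.nil_append, List.filter_map, List.map_map]
    rfl
  have hvals : ∀ kv ∈ groups.items, kv.2 = pvPos headers kv.1 := by
    intro kv hkv
    have := PySem.Dict.getD_of_mem_items (d := groups) (k := kv.1) (v := kv.2)
      (by exact hkv) hnodup (d0 := ([] : List Int))
    rw [← this, hgetD]
  have hkeys : ∀ j : Nat, j < headers.length →
      pvNorm (headers.getD j "") ∈ groups.items.map Prod.fst := by
    intro j hj
    have hkeq : groups.items.map Prod.fst = groups.keys := rfl
    rw [hkeq, hgroups,
      PySem.Dict.keys_foldl_modify_key (PySem.List.enumerate headers 0)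
        (fun p => pvNorm p.2) ([] : List Int) (fun _ p v => v ++ [p.1]) PySem.Dict.empty]
    have : pvNorm (headers.getD j "") ∈ (PySem.List.enumerate headers 0).map (fun p => pvNorm p.2) := by
      have hmem : headers.getD j "" ∈ headers := by
        rw [List.getD_eq_getElem?_getD, List.getElem?_eq_getElem hj]
        exact List.getElem_mem hj
      have : pvNorm (headers.getD j "") ∈ headers.map pvNorm := List.mem_map_of_mem hmem
      rw [← PySem.List.map_snd_enumerate headers (0 : Int), List.map_map] at this
      simpa using this
    rw [PySem.Dict.keys_empty]
    exact (PySem.Set.mem_update _ _ _).mpr (Or.inr this)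
  apply List.ext_getElem?
  intro j
  have hfold := outer_fold headers groups.items (List.replicate headers.length "")
    (by simp) hvals j
  -- the port's inner lambda is definitionally pvLabel
  rw [show (fun (res : List String) (kv : String × List Int) =>
        (PySem.List.enumerate kv.2 0).foldl
          (fun r ip => PySem.List.pySetD r ip.2
            (if ip.1 = 0 then kv.1 else kv.1 ++ "." ++ PySem.Int.toStr ip.1)) res)
      = (fun (res : List String) (kv : String × List Int) =>
        (PySem.List.enumerate kv.2 0).foldl
          (fun r ip => PySem.List.pySetD r ip.2 (pvLabel kv.1 ip.1)) res) from rfl]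
  rw [hfold]
  by_cases hj : j < headers.length
  · rw [if_pos ⟨hj, hkeys j hj⟩]
    unfold pvSpecList
    rw [List.getElem?_map, List.getElem?_range (by simpa using hj)]
    rfl
  · rw [if_neg (by intro hx; exact hj hx.1)]
    rw [List.getElem?_eq_none (by simpa using Nat.le_of_not_lt hj)]
    unfold pvSpecList
    rw [List.getElem?_eq_none (by simp; omega)]

-- ===== VERDICT (by name: the statement is the Claim_ definition above) =====
theorem deduplicate_headers_spec : Claim_equal_deduplicate_headers := by
  intro headers _
  unfold Spec_deduplicate_headers
  rw [A_eq_spec, B_eq_spec]
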